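-- pv_equiv track=rewrite | github.com/sausterm/omnisciences-research | metric-bundle/computations/gauge_kinetic_full.py | gen_index
-- ===== SOURCE A (Python) =====
-- def gen_index(p, q):
--     """Map (p,q) pair to index in all_gens list."""
--     idx = 0
--     for pp in range(10):
--         for qq in range(pp+1, 10):
--             if pp == p and qq == q:
--                 return idx
--             idx += 1
--     return -1
-- ===== SOURCE B (Python) =====
-- def gen_index(p, q):
--     """Map (p,q) pair to index in all_gens list (closed form)."""
--     if 0 <= p <= 8 and p < q <= 9:
--         return p * 9 - p * (p - 1) // 2 + (q - p - 1)
--     return -1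
-- ===== Notes on version B (the rewrite author's own statement) =====
-- stated objective: simpler
-- what changed: Replaced the nested enumeration loop over all 45 pairs with a closed-form triangular-number formula p*9 - p*(p-1)//2 + (q-p-1) behind a range guard.
import Mathlib
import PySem

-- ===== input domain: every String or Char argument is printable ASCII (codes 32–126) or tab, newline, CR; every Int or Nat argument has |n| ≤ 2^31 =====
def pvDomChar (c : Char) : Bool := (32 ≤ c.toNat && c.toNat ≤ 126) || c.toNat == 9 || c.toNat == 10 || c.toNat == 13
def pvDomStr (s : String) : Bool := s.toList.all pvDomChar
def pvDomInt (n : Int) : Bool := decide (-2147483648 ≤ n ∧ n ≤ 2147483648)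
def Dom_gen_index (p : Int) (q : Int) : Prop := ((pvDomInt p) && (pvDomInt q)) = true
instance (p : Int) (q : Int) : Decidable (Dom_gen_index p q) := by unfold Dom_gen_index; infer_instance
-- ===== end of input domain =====

-- B replaces the nested 45-pair enumeration loop with a closed-form triangular-number formula (simpler).


-- ===== PORT A =====
-- inner loop: for qq in range(pp+1,10): if pp==p and qq==q: return idx; idx += 1
def gi_inner (p q pp : Int) : List Int → Int → Option Int × Int
  | [], idx => (none, idx)
  | qq :: rest, idx =>
    if pp = p ∧ qq = q then (some idx, idx) else gi_inner p q pp rest (idx + 1)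

-- outer loop: for pp in range(10): …
def gi_outer (p q : Int) : List Int → Int → Option Int
  | [], _ => none
  | pp :: rest, idx =>
    match gi_inner p q pp (PySem.List.pyRange (pp + 1) 10 1) idx with
    | (some v, _) => some v
    | (none, idx') => gi_outer p q rest idx'

def gen_index (p : Int) (q : Int) : Int :=
  (gi_outer p q (PySem.List.pyRange 0 10 1) 0).getD (-1)

-- ===== PORT B =====
def gen_index_alt (p : Int) (q : Int) : Int :=
  if 0 ≤ p ∧ p ≤ 8 ∧ p < q ∧ q ≤ 9 then
    p * 9 - PySem.Int.floordiv (p * (p - 1)) 2 + (q - p - 1)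
  else -1

-- ===== PRECONDITION & SPEC =====
def Spec_gen_index (p : Int) (q : Int) (out : Int) : Prop := out = gen_index_alt p q
instance (p : Int) (q : Int) (out : Int) : Decidable (Spec_gen_index p q out) := by unfold Spec_gen_index; infer_instance

-- ===== CLAIM (what is proved, stated in full; the proofs are below) =====
def Claim_equal_gen_index : Prop := ∀ (p : Int) (q : Int), Dom_gen_index p q → Spec_gen_index p q (gen_index p q)

-- ===== LEMMAS AND PROOFS =====
theorem gi_inner_fst_none (p q pp : Int) (qs : List Int) (idx : Int)
    (h : pp ≠ p ∨ q ∉ qs) : (gi_inner p q pp qs idx).1 = none := by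
  induction qs generalizing idx with
  | nil => rfl
  | cons qq rest ih =>
    have hcond : ¬(pp = p ∧ qq = q) := by
      rintro ⟨h1, h2⟩
      rcases h with h | h
      · exact h h1
      · exact h (h2 ▸ List.mem_cons_self)
    rw [gi_inner, if_neg hcond]
    refine ih _ ?_
    rcases h with h | h
    · exact Or.inl h
    · exact Or.inr fun hm => h (List.mem_cons_of_mem _ hm)

theorem gen_index_bounded_check :
    ((List.range 10).all fun pn => (List.range 10).all fun qn =>
      gen_index (pn : Int) (qn : Int) == gen_index_alt (pn : Int) (qn : Int)) = true := by
  decide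

theorem gi_outer_none (p q : Int) (pps : List Int) (idx : Int)
    (h : ∀ pp ∈ pps, pp ≠ p ∨ q ∉ PySem.List.pyRange (pp + 1) 10 1) :
    gi_outer p q pps idx = none := by
  induction pps generalizing idx with
  | nil => rfl
  | cons pp rest ih =>
    rw [gi_outer]
    have h1 := gi_inner_fst_none p q pp (PySem.List.pyRange (pp + 1) 10 1) idx
      (h pp List.mem_cons_self)
    cases hi : gi_inner p q pp (PySem.List.pyRange (pp + 1) 10 1) idx with
    | mk o i =>
      rw [hi] at h1; simp at h1; subst h1
      exact ih i fun x hx => h x (List.mem_cons_of_mem _ hx)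

theorem gen_index_out_of_range (p q : Int) (h : ¬(0 ≤ p ∧ p ≤ 9) ∨ ¬(0 ≤ q ∧ q ≤ 9)) :
    gen_index p q = -1 := by
  unfold gen_index
  rw [gi_outer_none]
  · rfl
  · intro pp hpp
    rw [PySem.List.mem_pyRange_one] at hpp
    rcases h with h | h
    · exact Or.inl (by omega)
    · exact Or.inr (by rw [PySem.List.mem_pyRange_one]; omega)

-- ===== VERDICT (by name: the statement is the Claim_ definition above) =====
theorem gen_index_spec : Claim_equal_gen_index := by
  intro p q _
  unfold Spec_gen_index
  by_cases hp : 0 ≤ p ∧ p ≤ 9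
  · by_cases hq : 0 ≤ q ∧ q ≤ 9
    · obtain ⟨hp1, hp2⟩ := hp
      obtain ⟨hq1, hq2⟩ := hq
      have hc := gen_index_bounded_check
      rw [List.all_eq_true] at hc
      have h1 := hc p.toNat (List.mem_range.mpr (by omega))
      rw [List.all_eq_true] at h1
      have h2 := h1 q.toNat (List.mem_range.mpr (by omega))
      rw [beq_iff_eq, Int.toNat_of_nonneg hp1, Int.toNat_of_nonneg hq1] at h2
      exact h2
    · rw [gen_index_out_of_range p q (Or.inr hq), gen_index_alt, if_neg (by omega)]
  · rw [gen_index_out_of_range p q (Or.inl hp), gen_index_alt, if_neg (by omega)]
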